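-- pv_equiv track=rewrite | github.com/leastzero/Algorithm | 프로그래머스/1/135808. 과일 장수/과일 장수.py | solution
-- ===== SOURCE A (Python) =====
-- def solution(k, m, score):
--     answer = 0
--     sorted_score = sorted(score, reverse=True)
--     index = m - 1
--
--     while index < len(score):
--         answer += sorted_score[index] * m
--         index += m
--
--     return answer
-- ===== SOURCE B (Python) =====
-- def solution(k, m, score):
--     # Bucket-count the scores, then walk the distinct values in descending order:
--     # a value whose run occupies descending positions [pos, pos+c) supplies the minima
--     # of exactly (pos+c)//m - pos//m boxes (the positions p with p % m == m-1 in the run).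
--     counts = {}
--     for s in score:
--         counts[s] = counts.get(s, 0) + 1
--     total = 0
--     pos = 0
--     for v in sorted(counts, reverse=True):
--         c = counts[v]
--         total += v * ((pos + c) // m - pos // m)
--         pos += c
--     return total * m
-- ===== Notes on version B (the rewrite author's own statement) =====
-- stated objective: alternative
-- what changed: Replaces the descending sort plus every-m-th-index while-loop by a counting dictionary: walk only the distinct values in descending order and compute each value's number of box minima by a floor-division formula on cumulative counts.
import Mathlib
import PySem

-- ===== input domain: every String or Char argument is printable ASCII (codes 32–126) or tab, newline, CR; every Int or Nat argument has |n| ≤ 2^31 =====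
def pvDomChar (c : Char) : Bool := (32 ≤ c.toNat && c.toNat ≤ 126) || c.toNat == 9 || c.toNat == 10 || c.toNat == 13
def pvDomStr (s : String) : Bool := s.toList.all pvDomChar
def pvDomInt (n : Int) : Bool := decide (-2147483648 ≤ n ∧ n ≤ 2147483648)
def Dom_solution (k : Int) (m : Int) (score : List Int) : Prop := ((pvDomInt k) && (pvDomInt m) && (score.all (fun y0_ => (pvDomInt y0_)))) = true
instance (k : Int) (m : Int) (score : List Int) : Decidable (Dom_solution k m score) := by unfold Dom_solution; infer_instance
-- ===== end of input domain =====

-- B replaces A's descending sort + every-m-th-index loop by a counting dictionary walked over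
-- the distinct values in descending order, with a floor-division formula on cumulative counts;
-- a genuinely different algorithm of similar cost (fewer values to sort when duplicates abound).

-- ===== PORT A =====
-- A's while loop; the `0 < m` conjunct is a termination guard only (Pre_ requires 1 ≤ m)
def solutionLoop (ss : List Int) (n m index answer : Int) : Int :=
  if _h : 0 < m ∧ index < n then
    solutionLoop ss n m (index + m) (answer + ((PySem.List.pyGet? ss index).getD 0) * m)
  else
    answer
termination_by (n - index).toNat
decreasing_by omega

def solution (_k : Int) (m : Int) (score : List Int) : Int :=
  let sorted_score := PySem.List.sorted score (fun x => x) true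
  solutionLoop sorted_score (score.length : Int) m (m - 1) 0

-- ===== PORT B =====
def solution_alt (_k : Int) (m : Int) (score : List Int) : Int :=
  -- counts[s] = counts.get(s, 0) + 1
  let counts := score.foldl (fun d x => d.insert x (d.getD x 0 + 1)) PySem.Dict.empty
  -- for v in sorted(counts, reverse=True): total += v*((pos+c)//m - pos//m); pos += c
  let r := (PySem.List.sorted counts.keys (fun x => x) true).foldl
    (fun (tp : Int × Int) v =>
      let c := counts.getD v 0
      (tp.1 + v * (PySem.Int.floordiv (tp.2 + c) m - PySem.Int.floordiv tp.2 m), tp.2 + c))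
    (0, 0)
  r.1 * m

-- ===== PRECONDITION & SPEC =====
-- Pre_ requires 1 ≤ m: for m ≤ 0 A never returns (IndexError via negative indexing, or an
-- infinite loop for m = 0 on a nonempty score), so those inputs are excluded.
def Pre_solution (_k : Int) (m : Int) (_score : List Int) : Prop := 1 ≤ m
instance (k : Int) (m : Int) (score : List Int) : Decidable (Pre_solution k m score) := by unfold Pre_solution; infer_instance
def pvWitness_solution : Int × Int × List Int := (4, 3, [1, 2, 3, 1, 2, 3, 1])

def Spec_solution (k : Int) (m : Int) (score : List Int) (out : Int) : Prop := out = solution_alt k m score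
instance (k : Int) (m : Int) (score : List Int) (out : Int) : Decidable (Spec_solution k m score out) := by unfold Spec_solution; infer_instance

-- ===== CLAIM (what is proved, stated in full; the proofs are below) =====
def Claim_equal_solution : Prop := ∀ (k : Int) (m : Int) (score : List Int), Dom_solution k m score → Pre_solution k m score → Spec_solution k m score (solution k m score)

-- ===== LEMMAS AND PROOFS =====

-- counting the elements of a concatenation of runs (one run per distinct value)
lemma count_flatMap_repl (cnt : Int → Nat) :
    ∀ (ks : List Int), ks.Nodup → ∀ x : Int,
      (ks.flatMap (fun v => List.replicate (cnt v) v)).count x =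
        if x ∈ ks then cnt x else 0 := by
  intro ks
  induction ks with
  | nil => intro _ x; simp
  | cons v ks ih =>
    intro hnd x
    rcases List.nodup_cons.mp hnd with ⟨hv, hnd'⟩
    rw [List.flatMap_cons, List.count_append, ih hnd' x, List.count_replicate]
    by_cases hx : x = v
    · subst hx
      simp [hv]
    · simp [hx, Ne.symm hx]

-- a concatenation of constant runs with weakly descending run values is weakly descending
lemma pairwise_flatMap_repl (cnt : Int → Nat) :
    ∀ (ks : List Int), ks.Pairwise (fun a b => b ≤ a) →
      (ks.flatMap (fun v => List.replicate (cnt v) v)).Pairwise (fun a b => b ≤ a) := by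
  intro ks
  induction ks with
  | nil => intro _; simp
  | cons v ks ih =>
    intro hpw
    rcases List.pairwise_cons.mp hpw with ⟨hhead, htail⟩
    rw [List.flatMap_cons]
    rw [List.pairwise_append]
    refine ⟨List.pairwise_replicate.mpr (Or.inr le_rfl), ih htail, ?_⟩
    intro x hx y hy
    rcases List.mem_flatMap.mp hy with ⟨u, hu, hyu⟩
    rw [List.eq_of_mem_replicate hx, List.eq_of_mem_replicate hyu]
    exact hhead u hu

-- the descending sorted list is the concatenation of count-many copies of each distinct value,
-- distinct values taken in descending order
lemma desc_eq_flatMap (score : List Int) :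
    PySem.List.sorted score (fun x => x) true =
      (PySem.List.sorted (PySem.Set.ofList score) (fun x => x) true).flatMap
        (fun v => List.replicate (score.count v) v) := by
  set ks := PySem.List.sorted (PySem.Set.ofList score) (fun x => x) true with hks
  set F := ks.flatMap (fun v => List.replicate (score.count v) v) with hF
  have hksperm : ks.Perm (PySem.Set.ofList score) := PySem.List.sorted_perm _ _ _
  have hksnd : ks.Nodup := hksperm.symm.nodup (PySem.Set.nodup_ofList score)
  have hmemks : ∀ x : Int, x ∈ ks ↔ x ∈ score := by
    intro x
    rw [hksperm.mem_iff]
    exact PySem.Set.mem_ofList score x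
  have hperm : F.Perm score := by
    rw [List.perm_iff_count]
    intro x
    rw [hF, count_flatMap_repl _ ks hksnd x]
    by_cases hx : x ∈ ks
    · simp [hx]
    · have : x ∉ score := fun hc => hx ((hmemks x).mpr hc)
      simp [hx, List.count_eq_zero.mpr this]
  have hFpw : F.Pairwise (fun a b => b ≤ a) :=
    pairwise_flatMap_repl _ ks (PySem.List.sorted_pairwise_rev _ _)
  have hdpw : (PySem.List.sorted score (fun x => x) true).Pairwise (fun a b => b ≤ a) :=
    PySem.List.sorted_pairwise_rev _ _
  have hdperm : (PySem.List.sorted score (fun x => x) true).Perm score :=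
    PySem.List.sorted_perm _ _ _
  have hrev : (PySem.List.sorted score (fun x => x) true).reverse = F.reverse := by
    apply PySem.List.eq_of_perm_of_pairwise_le_of_injective (fun x : Int => x)
      (fun a b hab => hab)
    · exact ((List.reverse_perm _).trans (hdperm.trans hperm.symm)).trans
        (List.reverse_perm F).symm
    · exact List.pairwise_reverse.mpr hdpw
    · exact List.pairwise_reverse.mpr hFpw
  exact List.reverse_injective hrev

-- A's loop starting at index i*m + (m-1) sums desc[j*m-1] for j = i+1 .. n//m, scaled by m
lemma solutionLoop_eq (desc : List Int) (n m q : Int) (hn : n = (desc.length : Int))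
    (hm : 1 ≤ m) (hq : q = PySem.Int.floordiv n m) :
    ∀ (t : Nat) (i ans : Int), 0 ≤ i → (q - i).toNat ≤ t →
      solutionLoop desc n m (i * m + (m - 1)) ans =
        ans + m * ((PySem.List.pyRange (i + 1) (q + 1) 1).map
          (fun j => (PySem.List.pyGet? desc (j * m - 1)).getD 0)).sum := by
  have hn0 : 0 ≤ n := by simp [hn]
  have hiff : ∀ j : Int, j ≤ q ↔ j * m ≤ n := by
    intro j
    rw [hq, PySem.Int.le_floordiv_iff_mul_le (by omega)]
  intro t
  induction t with
  | zero =>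
    intro i ans hi ht
    have hqi : q ≤ i := by omega
    have hexit : ¬ (i + 1) * m ≤ n := by
      intro hc
      have := (hiff (i + 1)).2 hc
      omega
    rw [solutionLoop, dif_neg (by rintro ⟨h1, h2⟩; nlinarith)]
    rw [PySem.List.pyRange_one_eq_nil (by omega)]
    simp
  | succ t ih =>
    intro i ans hi ht
    by_cases hcont : (i + 1) * m ≤ n
    · have hle : i + 1 ≤ q := (hiff (i + 1)).2 hcont
      have hin : i * m + (m - 1) < n := by nlinarith
      have hm0 : 0 < m := by omega
      have hi1 : (0 : Int) ≤ i + 1 := by omega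
      have hfuel : (q - (i + 1)).toNat ≤ t := by omega
      have hrng : i + 1 < q + 1 := by omega
      rw [solutionLoop, dif_pos ⟨hm0, hin⟩]
      have hidx : i * m + (m - 1) + m = (i + 1) * m + (m - 1) := by ring
      rw [hidx, ih (i + 1) _ hi1 hfuel]
      rw [PySem.List.pyRange_one_cons hrng, List.map_cons, List.sum_cons]
      have hget : i * m + (m - 1) = (i + 1) * m - 1 := by ring
      rw [hget]
      ring
    · have hexit : ¬ (i * m + (m - 1) < n) := by
        intro hc
        exact hcont (by nlinarith)
      rw [solutionLoop, dif_neg (by intro hc; exact hexit hc.2)]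
      have hqi : ¬ (i + 1 ≤ q) := fun hc => hcont ((hiff (i + 1)).1 hc)
      rw [PySem.List.pyRange_one_eq_nil (by omega)]
      simp

-- reading inside the middle run of a concatenation
lemma pyGet_mid (pre rest : List Int) (c : Nat) (v : Int) (idx : Int)
    (h0 : (pre.length : Int) ≤ idx) (h1 : idx < (pre.length : Int) + (c : Int)) :
    PySem.List.pyGet? (pre ++ (List.replicate c v ++ rest)) idx = some v := by
  have h0' : 0 ≤ idx := le_trans (by positivity) h0
  rw [PySem.List.pyGet?_of_nonneg _ h0']
  rw [List.getElem?_append_right (by omega)]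
  rw [List.getElem?_append_left (by simp; omega)]
  rw [List.getElem?_replicate]
  rw [if_pos (by omega : idx.toNat - pre.length < c)]

-- B's fold over the remaining distinct values, with pos = length of the prefix already consumed,
-- accumulates exactly the remaining part of the same sum (unscaled)
lemma foldB_eq (desc : List Int) (n m q : Int) (cnt : Int → Nat)
    (hn : n = (desc.length : Int)) (hm : 1 ≤ m) (hq : q = PySem.Int.floordiv n m) :
    ∀ (ks pre : List Int) (tot : Int),
      desc = pre ++ ks.flatMap (fun v => List.replicate (cnt v) v) →
      (ks.foldl (fun (tp : Int × Int) v =>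
          (tp.1 + v * (PySem.Int.floordiv (tp.2 + (cnt v : Int)) m - PySem.Int.floordiv tp.2 m),
           tp.2 + (cnt v : Int))) (tot, (pre.length : Int))).1 =
        tot + ((PySem.List.pyRange (PySem.Int.floordiv (pre.length : Int) m + 1) (q + 1) 1).map
          (fun j => (PySem.List.pyGet? desc (j * m - 1)).getD 0)).sum := by
  have hm0 : 0 < m := by omega
  have hbr : ∀ a : Int, PySem.Int.floordiv a m * m ≤ a ∧ a < PySem.Int.floordiv a m * m + m := by
    intro a
    have h := PySem.Int.floordiv_mul_add_mod a m
    have h1 := PySem.Int.mod_nonneg a hm0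
    have h2 := PySem.Int.mod_lt a hm0
    omega
  intro ks
  induction ks with
  | nil =>
    intro pre tot hsplit
    have hpre : desc = pre := by simpa using hsplit
    have hqq : PySem.Int.floordiv ((pre.length : Int)) m = q := by
      rw [hq, hn, hpre]
    rw [List.foldl_nil, hqq, PySem.List.pyRange_one_eq_nil (by omega)]
    simp
  | cons v ks ih =>
    intro pre tot hsplit
    have hsplit' : desc = (pre ++ List.replicate (cnt v) v) ++
        ks.flatMap (fun u => List.replicate (cnt u) u) := by
      rw [hsplit, List.flatMap_cons, List.append_assoc]
    have hlen' : (((pre ++ List.replicate (cnt v) v).length : Nat) : Int) =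
        (pre.length : Int) + (cnt v : Int) := by
      simp
    have hposc_le : (pre.length : Int) + (cnt v : Int) ≤ n := by
      have h := congrArg List.length hsplit'
      rw [hn, h]
      simp only [List.length_append, List.length_replicate]
      push_cast
      omega
    obtain ⟨hb1, hb2⟩ := hbr (pre.length : Int)
    obtain ⟨hb3, hb4⟩ := hbr ((pre.length : Int) + (cnt v : Int))
    have hq12 : PySem.Int.floordiv (pre.length : Int) m ≤
        PySem.Int.floordiv ((pre.length : Int) + (cnt v : Int)) m := by
      rw [PySem.Int.le_floordiv_iff_mul_le (by omega)]
      have hc0 : (0 : Int) ≤ (cnt v : Int) := by positivity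
      omega
    have hq2q : PySem.Int.floordiv ((pre.length : Int) + (cnt v : Int)) m ≤ q := by
      rw [hq, PySem.Int.le_floordiv_iff_mul_le (by omega)]
      omega
    rw [List.foldl_cons]
    have hinit : (((tot, ((pre.length : Nat) : Int)).1 +
          v * (PySem.Int.floordiv ((tot, ((pre.length : Nat) : Int)).2 + ((cnt v : Nat) : Int)) m -
            PySem.Int.floordiv (tot, ((pre.length : Nat) : Int)).2 m),
          (tot, ((pre.length : Nat) : Int)).2 + ((cnt v : Nat) : Int)) : Int × Int) =
        (tot + v * (PySem.Int.floordiv (((pre.length : Nat) : Int) + ((cnt v : Nat) : Int)) m -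
          PySem.Int.floordiv ((pre.length : Nat) : Int) m),
         (((pre ++ List.replicate (cnt v) v).length : Nat) : Int)) := by
      rw [hlen']
    rw [hinit]
    rw [ih (pre ++ List.replicate (cnt v) v) _ hsplit']
    rw [hlen']
    rw [PySem.List.pyRange_one_append (PySem.Int.floordiv (pre.length : Int) m + 1)
      (PySem.Int.floordiv ((pre.length : Int) + (cnt v : Int)) m + 1) (q + 1)
      (by omega) (by omega)]
    rw [List.map_append, List.sum_append]
    have hconst : ((PySem.List.pyRange (PySem.Int.floordiv (pre.length : Int) m + 1)
        (PySem.Int.floordiv ((pre.length : Int) + (cnt v : Int)) m + 1) 1).map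
        (fun j => (PySem.List.pyGet? desc (j * m - 1)).getD 0)).sum =
        v * (PySem.Int.floordiv ((pre.length : Int) + (cnt v : Int)) m -
          PySem.Int.floordiv (pre.length : Int) m) := by
      have hmap : (PySem.List.pyRange (PySem.Int.floordiv (pre.length : Int) m + 1)
          (PySem.Int.floordiv ((pre.length : Int) + (cnt v : Int)) m + 1) 1).map
          (fun j => (PySem.List.pyGet? desc (j * m - 1)).getD 0) =
          (PySem.List.pyRange (PySem.Int.floordiv (pre.length : Int) m + 1)
          (PySem.Int.floordiv ((pre.length : Int) + (cnt v : Int)) m + 1) 1).map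
          (fun _ => v) := by
        apply List.map_congr_left
        intro j hj
        rcases (PySem.List.mem_pyRange_one).mp hj with ⟨hj1, hj2⟩
        have hjm1 : PySem.Int.floordiv (pre.length : Int) m * m + m ≤ j * m := by nlinarith
        have hjm2 : j * m ≤
            PySem.Int.floordiv ((pre.length : Int) + (cnt v : Int)) m * m := by nlinarith
        have hlow : (pre.length : Int) ≤ j * m - 1 := by omega
        have hhigh : j * m - 1 < (pre.length : Int) + (cnt v : Int) := by omega
        rw [hsplit, List.flatMap_cons]
        rw [pyGet_mid pre _ (cnt v) v (j * m - 1) hlow hhigh]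
        rfl
      rw [hmap, PySem.List.sum_map_const_int, PySem.List.length_pyRange_one]
      have hcast : (((PySem.Int.floordiv ((pre.length : Int) + (cnt v : Int)) m + 1 -
          (PySem.Int.floordiv (pre.length : Int) m + 1)).toNat : Nat) : Int) =
          PySem.Int.floordiv ((pre.length : Int) + (cnt v : Int)) m -
          PySem.Int.floordiv (pre.length : Int) m := by omega
      rw [hcast]
      ring
    rw [hconst]
    ring

-- ===== VERDICT (by name: the statement is the Claim_ definition above) =====
theorem solution_spec : Claim_equal_solution := by
  intro k m score _ hmP
  have hm : (1:Int) ≤ m := hmP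
  unfold Spec_solution solution solution_alt
  simp only []
  rw [PySem.Dict.foldl_insert_getD_add_one_eq_counter, PySem.Dict.keys_counter]
  simp only [PySem.Dict.getD_counter]
  have hn : ((PySem.List.sorted score (fun x => x) true).length : Int) = (score.length : Int) := by
    rw [PySem.List.length_sorted]
  have hB := foldB_eq (PySem.List.sorted score (fun x => x) true) (score.length : Int) m
      (PySem.Int.floordiv (score.length : Int) m) (fun v => score.count v) hn.symm hm rfl
      (PySem.List.sorted (PySem.Set.ofList score) (fun x => x) true) [] 0
      (by simpa using desc_eq_flatMap score)
  have hA := solutionLoop_eq (PySem.List.sorted score (fun x => x) true) (score.length : Int) m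
      (PySem.Int.floordiv (score.length : Int) m) hn.symm hm rfl
      (PySem.Int.floordiv (score.length : Int) m).toNat 0 0 le_rfl (by simp)
  have hz : PySem.Int.floordiv ((0 : Nat) : Int) m = 0 := by
    rw [PySem.Int.floordiv_eq_ediv_of_pos (by omega)]
    simp
  simp only [List.length_nil] at hB
  rw [hz] at hB
  rw [show (0 : Int) * m + (m - 1) = m - 1 by ring] at hA
  rw [hA]
  simp only [Nat.cast_zero] at hB
  rw [hB]
  ring
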